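-- pv_equiv track=rewrite | github.com/littlemisslilycane/Information-Retrieval | Project_Information_Retrieval_System/src/Evaluation.py | get_rel_non_rel_list
-- ===== SOURCE A (Python) =====
-- def get_rel_non_rel_list(top100, rel_list):
--     rel_non_rel_map = {}
--     for document in top100:
--         if not rel_list:
--             rel_non_rel_map[document] = "NON-REL"
--         else:
--             if document in rel_list:
--                 rel_non_rel_map[document] = "REL"
--             else:
--                 rel_non_rel_map[document] = "NON-REL"
--     return rel_non_rel_map
-- ===== SOURCE B (Python) =====
-- def get_rel_non_rel_list(top100, rel_list):
--     rel_non_rel_map = {}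
--     for document in top100:
--         rel_non_rel_map[document] = "NON-REL"
--     for document in rel_list:
--         if document in rel_non_rel_map:
--             rel_non_rel_map[document] = "REL"
--     return rel_non_rel_map
-- ===== Notes on version B (the rewrite author's own statement) =====
-- stated objective: faster
-- what changed: Instead of testing each top100 document for membership in rel_list (a linear scan per document), B first labels every top100 document NON-REL in one pass, then iterates over rel_list and flips to REL the entries already present as dict keys.
import Mathlib
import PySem

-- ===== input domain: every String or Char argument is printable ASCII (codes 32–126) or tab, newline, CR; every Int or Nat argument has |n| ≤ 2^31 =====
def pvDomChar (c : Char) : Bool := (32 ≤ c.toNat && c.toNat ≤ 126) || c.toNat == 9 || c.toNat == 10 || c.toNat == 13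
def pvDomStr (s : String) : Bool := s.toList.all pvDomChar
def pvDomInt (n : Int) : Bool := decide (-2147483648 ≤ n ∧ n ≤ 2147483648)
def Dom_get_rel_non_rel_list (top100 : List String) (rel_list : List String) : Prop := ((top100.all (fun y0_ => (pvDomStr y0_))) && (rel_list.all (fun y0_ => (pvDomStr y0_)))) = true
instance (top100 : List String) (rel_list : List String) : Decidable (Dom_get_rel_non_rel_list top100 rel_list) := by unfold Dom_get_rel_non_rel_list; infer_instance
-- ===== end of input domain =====

-- B replaces A's per-document membership scan of rel_list with a second pass that scatters
-- "REL" over the dict built in pass one (objective: faster — dict lookups instead of list scans).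

-- ===== PORT A =====
-- one loop over top100; each document labelled by membership in rel_list
def get_rel_non_rel_list (top100 : List String) (rel_list : List String) : List (String × String) :=
  (top100.foldl (fun rel_non_rel_map document =>
      if rel_list = [] then rel_non_rel_map.insert document "NON-REL"
      else if document ∈ rel_list then rel_non_rel_map.insert document "REL"
      else rel_non_rel_map.insert document "NON-REL")
    (PySem.Dict.empty)).items

-- ===== PORT B =====
-- pass 1: every top100 document ↦ "NON-REL"; pass 2: for each rel_list entry already a key, set "REL"
def get_rel_non_rel_list_alt (top100 : List String) (rel_list : List String) : List (String × String) :=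
  let d0 := top100.foldl (fun rel_non_rel_map document => rel_non_rel_map.insert document "NON-REL")
    (PySem.Dict.empty)
  (rel_list.foldl (fun rel_non_rel_map document =>
      if rel_non_rel_map.contains document then rel_non_rel_map.insert document "REL"
      else rel_non_rel_map) d0).items

-- ===== PRECONDITION & SPEC =====
def Spec_get_rel_non_rel_list (top100 : List String) (rel_list : List String) (out : List (String × String)) : Prop := out = get_rel_non_rel_list_alt top100 rel_list
instance (top100 : List String) (rel_list : List String) (out : List (String × String)) : Decidable (Spec_get_rel_non_rel_list top100 rel_list out) := by unfold Spec_get_rel_non_rel_list; infer_instance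

-- ===== CLAIM (what is proved, stated in full; the proofs are below) =====
def Claim_equal_get_rel_non_rel_list : Prop := ∀ (top100 : List String) (rel_list : List String), Dom_get_rel_non_rel_list top100 rel_list → Spec_get_rel_non_rel_list top100 rel_list (get_rel_non_rel_list top100 rel_list)

-- ===== LEMMAS AND PROOFS =====

-- getD through a fold of inserts whose value depends only on the key
theorem getD_foldl_insert_fun (xs : List String) (g : String → String)
    (d : PySem.Dict String String) (k dflt : String) :
    (xs.foldl (fun d x => d.insert x (g x)) d).getD k dflt
      = if k ∈ xs then g k else d.getD k dflt := by
  induction xs generalizing d with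
  | nil => simp
  | cons x xs ih =>
      simp only [List.foldl_cons, ih, PySem.Dict.getD_insert, List.mem_cons]
      by_cases hk : k = x <;> by_cases hm : k ∈ xs <;> simp [hk, hm]

-- A's three-way branch is the same insert with a key-only value function
theorem foldA_eq (top100 rel_list : List String) (d : PySem.Dict String String) :
    top100.foldl (fun rel_non_rel_map document =>
      if rel_list = [] then rel_non_rel_map.insert document "NON-REL"
      else if document ∈ rel_list then rel_non_rel_map.insert document "REL"
      else rel_non_rel_map.insert document "NON-REL") d
    = top100.foldl (fun d x =>
        d.insert x (if x ∈ rel_list then "REL" else "NON-REL")) d := by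
  have hstep : ∀ (d : PySem.Dict String String) (x : String),
      (if rel_list = [] then d.insert x "NON-REL"
       else if x ∈ rel_list then d.insert x "REL"
       else d.insert x "NON-REL")
        = d.insert x (if x ∈ rel_list then "REL" else "NON-REL") := by
    intro d x
    rcases rel_list with _ | ⟨r, rs⟩
    · simp
    · by_cases hx : x ∈ r :: rs <;> simp [hx]
  simp only [hstep]

-- B's second pass never changes the key list
theorem keys_foldB (rel : List String) (d : PySem.Dict String String) :
    (rel.foldl (fun d doc => if d.contains doc then d.insert doc "REL" else d) d).keys
      = d.keys := by
  induction rel generalizing d with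
  | nil => rfl
  | cons r rs ih =>
      simp only [List.foldl_cons]
      by_cases h : d.contains r = true
      · simp [h, ih, PySem.Dict.keys_insert_of_contains _ _ h]
      · simp [h, ih]

-- getD through B's second pass
theorem getD_foldB (rel : List String) (d : PySem.Dict String String) (k dflt : String) :
    (rel.foldl (fun d doc => if d.contains doc then d.insert doc "REL" else d) d).getD k dflt
      = if d.contains k = true ∧ k ∈ rel then "REL" else d.getD k dflt := by
  induction rel generalizing d with
  | nil => simp
  | cons r rs ih =>
      simp only [List.foldl_cons]
      by_cases hr : d.contains r = true
      · simp only [hr, if_true, ih, PySem.Dict.getD_insert, PySem.Dict.contains_insert]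
        by_cases hk : k = r <;> by_cases hm : k ∈ rs <;>
          simp [hk, hm, hr, List.mem_cons]
      · simp only [hr, ih, List.mem_cons]
        by_cases hk : k = r
        · subst hk; simp [hr]
        · simp [hk]

-- ===== VERDICT (by name: the statement is the Claim_ definition above) =====
theorem get_rel_non_rel_list_spec : Claim_equal_get_rel_non_rel_list := by
  intro top100 rel_list _
  unfold Spec_get_rel_non_rel_list get_rel_non_rel_list get_rel_non_rel_list_alt
  rw [foldA_eq]
  set gA : String → String := fun x => if x ∈ rel_list then "REL" else "NON-REL" with hgA
  set dA := top100.foldl (fun d x => d.insert x (gA x)) (PySem.Dict.empty : PySem.Dict String String) with hdA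
  set d0 := top100.foldl (fun d x => d.insert x "NON-REL") (PySem.Dict.empty : PySem.Dict String String) with hd0
  set dB := rel_list.foldl (fun d doc => if d.contains doc then d.insert doc "REL" else d) d0 with hdB
  have hkA : dA.keys = PySem.Set.update ([] : List String) top100 := by
    rw [hdA]; rw [PySem.Dict.keys_foldl_insert]; simp
  have hk0 : d0.keys = PySem.Set.update ([] : List String) top100 := by
    rw [hd0]; rw [PySem.Dict.keys_foldl_insert (f := fun _ _ => "NON-REL")]; simp
  have hkB : dB.keys = PySem.Set.update ([] : List String) top100 := by
    rw [hdB, keys_foldB, hk0]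
  have hndA : dA.keys.Nodup := by
    rw [hdA]; exact PySem.Dict.nodup_keys_foldl_insert _ _ _ (by simp)
  have hndB : dB.keys.Nodup := by
    rw [hkB, ← hkA]; exact hndA
  rw [PySem.Dict.items_eq_map_keys dA hndA "NON-REL",
      PySem.Dict.items_eq_map_keys dB hndB "NON-REL", hkA, hkB]
  apply List.map_congr_left
  intro k hk
  have hkmem : k ∈ top100 := by
    have := (PySem.Set.mem_update ([] : PySem.Set String) top100 k).mp hk
    simpa using this
  have h0c : d0.contains k = true := by
    rw [PySem.Dict.contains_iff_mem_keys, hk0]; exact hk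
  have hA : dA.getD k "NON-REL" = gA k := by
    rw [hdA, getD_foldl_insert_fun]; simp [hkmem]
  have h0 : d0.getD k "NON-REL" = "NON-REL" := by
    rw [hd0, getD_foldl_insert_fun (g := fun _ => "NON-REL")]; simp
  have hB : dB.getD k "NON-REL" = if k ∈ rel_list then "REL" else "NON-REL" := by
    rw [hdB, getD_foldB, h0]; simp [h0c]
  simp [hA, hB, hgA]
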